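-- pv_equiv track=rewrite | github.com/geduran/jazzChordTranscription | src/chordTranscription/transcriptionManager.py | _updateExpandIndexes
-- ===== SOURCE A (Python) =====
-- def _updateExpandIndexes(expand, compress):
--     """
--         Method that updates the expand indexes, because they where modified
--         after compression.
--
--         :param : Expand dict
--         :type : dict
--         :param : Compress dict
--         :type : dict
--         :return: dict. Updated indexes of expand.
--     """
--
--     indexes = sorted(expand.keys())
--     outIndexes = indexes
--     for compIndex, compTimes in sorted(compress.items()):
--         for i, currIndex in enumerate(indexes):
--             if compIndex < currIndex:
--                 outIndexes[i:] = [x-compTimes for x in outIndexes[i:]]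
--                 break
--     outExpand = {}
--     for i, itms in enumerate(sorted(expand.items())):
--         _, value = itms
--         outExpand[outIndexes[i]] = value
--     return outExpand
-- ===== SOURCE B (Python) =====
-- def _updateExpandIndexes(expand, compress):
--     # Two-pointer single pass: compressions (sorted) and sorted expand keys are
--     # merged once, carrying a running offset, instead of rewriting a suffix of
--     # the index list for every compression entry.
--     keys = sorted(expand.keys())
--     n = len(keys)
--     out = []
--     acc = 0
--     p = 0
--     for compIndex, compTimes in sorted(compress.items()):
--         while p < n and keys[p] - acc <= compIndex:
--             out.append(keys[p] - acc)
--             p += 1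
--         if p == n:
--             break
--         acc += compTimes
--     out.extend(k - acc for k in keys[p:])
--     return {o: v for o, (_, v) in zip(out, sorted(expand.items()))}
-- ===== Notes on version B (the rewrite author's own statement) =====
-- stated objective: faster
-- what changed: A rewrites the whole suffix of the index list once per compression entry (and rescans it from the front each time); B merges the sorted compression entries with the sorted expand keys in a single two-pointer pass carrying a running offset, emitting each shifted index exactly once.
import Mathlib
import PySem

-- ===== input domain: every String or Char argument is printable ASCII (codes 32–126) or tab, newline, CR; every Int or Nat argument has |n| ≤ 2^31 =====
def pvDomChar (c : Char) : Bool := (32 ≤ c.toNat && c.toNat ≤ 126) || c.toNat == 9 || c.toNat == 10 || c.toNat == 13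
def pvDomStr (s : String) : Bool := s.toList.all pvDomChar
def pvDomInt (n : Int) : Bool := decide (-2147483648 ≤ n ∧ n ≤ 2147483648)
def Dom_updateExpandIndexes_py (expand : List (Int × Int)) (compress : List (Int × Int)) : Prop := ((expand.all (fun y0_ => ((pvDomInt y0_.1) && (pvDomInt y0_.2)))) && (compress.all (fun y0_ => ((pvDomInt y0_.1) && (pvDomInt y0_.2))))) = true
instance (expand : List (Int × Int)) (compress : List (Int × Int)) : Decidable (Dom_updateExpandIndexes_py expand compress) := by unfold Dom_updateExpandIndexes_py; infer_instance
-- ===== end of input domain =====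

-- B replaces A's per-compression suffix rewrite with one two-pointer merge of the sorted
-- compressions against the sorted expand keys, carrying a running offset.

-- ===== PORT A =====
-- inner loop 'for i, currIndex in enumerate(indexes): if compIndex < currIndex:
--   outIndexes[i:] = [x-compTimes for x in outIndexes[i:]]; break'
-- (outIndexes aliases indexes, and the loop breaks right after the slice assignment)
def pvInnerA (compIndex compTimes : Int) : List Int → List Int
  | [] => []
  | x :: rest =>
    if compIndex < x then (x - compTimes) :: rest.map (fun y => y - compTimes)
    else x :: pvInnerA compIndex compTimes rest

def updateExpandIndexes_py (expand : List (Int × Int)) (compress : List (Int × Int)) : List (Int × Int) :=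
  let expD := PySem.Dict.ofList expand
  let compD := PySem.Dict.ofList compress
  let indexes := PySem.List.sorted expD.keys (fun x => x) false
  let outIndexes := (PySem.List.sorted2 compD.items Prod.fst Prod.snd false).foldl
    (fun xs ct => pvInnerA ct.1 ct.2 xs) indexes
  let outExpand := (PySem.List.enumerate (PySem.List.sorted2 expD.items Prod.fst Prod.snd false) 0).foldl
    (fun d p => d.insert (PySem.List.pyGetD outIndexes p.1 0) p.2.2) PySem.Dict.empty
  outExpand.items

-- ===== PORT B =====
-- 'for compIndex, compTimes in sorted(compress.items()):
--    while p < n and keys[p] - acc <= compIndex: out.append(keys[p] - acc); p += 1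
--    if p == n: break
--    acc += compTimes' then 'out.extend(k - acc for k in keys[p:])';
-- the suffix keys[p:] is the list argument, out is built by the cons results.
def pvTwoPtr : List Int → Int → List (Int × Int) → List Int
  | ks, acc, [] => ks.map (fun k => k - acc)
  | [], _, _ :: _ => []
  | k :: ks, acc, (c, t) :: cs =>
    if k - acc ≤ c then (k - acc) :: pvTwoPtr ks acc ((c, t) :: cs)
    else pvTwoPtr (k :: ks) (acc + t) cs
termination_by ks _ cs => (cs.length, ks.length)

def updateExpandIndexes_py_alt (expand : List (Int × Int)) (compress : List (Int × Int)) : List (Int × Int) :=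
  let expD := PySem.Dict.ofList expand
  let compD := PySem.Dict.ofList compress
  let keys := PySem.List.sorted expD.keys (fun x => x) false
  let out := pvTwoPtr keys 0 (PySem.List.sorted2 compD.items Prod.fst Prod.snd false)
  (PySem.Dict.ofList
    (out.zip ((PySem.List.sorted2 expD.items Prod.fst Prod.snd false).map Prod.snd))).items

-- ===== PRECONDITION & SPEC =====
def Spec_updateExpandIndexes_py (expand : List (Int × Int)) (compress : List (Int × Int)) (out : List (Int × Int)) : Prop := out = updateExpandIndexes_py_alt expand compress
instance (expand : List (Int × Int)) (compress : List (Int × Int)) (out : List (Int × Int)) : Decidable (Spec_updateExpandIndexes_py expand compress out) := by unfold Spec_updateExpandIndexes_py; infer_instance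

-- ===== CLAIM (what is proved, stated in full; the proofs are below) =====
def Claim_equal_updateExpandIndexes_py : Prop := ∀ (expand : List (Int × Int)) (compress : List (Int × Int)), Dom_updateExpandIndexes_py expand compress → Spec_updateExpandIndexes_py expand compress (updateExpandIndexes_py expand compress)

-- ===== LEMMAS AND PROOFS =====

theorem pvInnerA_id (c t : Int) (xs : List Int) (h : ∀ y ∈ xs, ¬ c < y) :
    pvInnerA c t xs = xs := by
  induction xs with
  | nil => rfl
  | cons x rest ih =>
    simp only [pvInnerA]
    rw [if_neg (h x (by simp)), ih (fun y hy => h y (by simp [hy]))]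

theorem pvInnerA_append (c t : Int) (done xs : List Int) (h : ∀ y ∈ done, ¬ c < y) :
    pvInnerA c t (done ++ xs) = done ++ pvInnerA c t xs := by
  induction done with
  | nil => rfl
  | cons x rest ih =>
    simp only [List.cons_append, pvInnerA]
    rw [if_neg (h x (by simp)), ih (fun y hy => h y (by simp [hy]))]

theorem foldl_pvInnerA_id (comps : List (Int × Int)) (done : List Int)
    (h : ∀ y ∈ done, ∀ ct ∈ comps, ¬ ct.1 < y) :
    comps.foldl (fun xs ct => pvInnerA ct.1 ct.2 xs) done = done := by
  induction comps with
  | nil => rfl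
  | cons ct cs ih =>
    simp only [List.foldl_cons]
    rw [pvInnerA_id _ _ _ (fun y hy => h y hy ct (by simp)),
        ih (fun y hy c' hc' => h y hy c' (by simp [hc']))]

theorem pvInnerA_length (c t : Int) (xs : List Int) :
    (pvInnerA c t xs).length = xs.length := by
  induction xs with
  | nil => rfl
  | cons x rest ih =>
    simp only [pvInnerA]
    split <;> simp [ih]

theorem foldl_pvInnerA_length (comps : List (Int × Int)) (xs : List Int) :
    (comps.foldl (fun xs ct => pvInnerA ct.1 ct.2 xs) xs).length = xs.length := by
  induction comps generalizing xs with
  | nil => rfl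
  | cons ct cs ih => simp only [List.foldl_cons]; rw [ih, pvInnerA_length]

theorem core (ks : List Int) (acc : Int) (comps : List (Int × Int)) (done : List Int)
    (hcomps : comps.Pairwise (fun a b => a.1 ≤ b.1))
    (hdone : ∀ y ∈ done, ∀ ct ∈ comps, ¬ ct.1 < y) :
    comps.foldl (fun xs ct => pvInnerA ct.1 ct.2 xs) (done ++ ks.map (fun k => k - acc))
      = done ++ pvTwoPtr ks acc comps := by
  induction ks, acc, comps using pvTwoPtr.induct generalizing done with
  | case1 ks acc => simp [pvTwoPtr]
  | case2 acc c cs =>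
    simp only [pvTwoPtr, List.map_nil, List.append_nil]
    exact foldl_pvInnerA_id _ _ hdone
  | case3 k ks acc c t cs hle ih =>
    -- k - acc ≤ c
    rw [show done ++ (k :: ks).map (fun k => k - acc)
          = (done ++ [k - acc]) ++ ks.map (fun k => k - acc) by simp]
    rw [ih (done ++ [k - acc]) hcomps ?_]
    · simp only [pvTwoPtr, if_pos hle]
      simp
    · intro y hy ct hct
      rcases List.mem_append.1 hy with h' | h'
      · exact hdone y h' ct hct
      · simp only [List.mem_singleton] at h'
        subst h'
        have : c ≤ ct.1 := by
          rcases List.mem_cons.1 hct with rfl | h''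
          · exact le_refl _
          · exact (List.pairwise_cons.1 hcomps).1 ct h''
        omega
  | case4 k ks acc c t cs hgt ih =>
    simp only [List.foldl_cons]
    rw [pvInnerA_append c t done _ (fun y hy => hdone y hy (c, t) (by simp))]
    have hlt : c < k - acc := by omega
    have : pvInnerA c t ((k :: ks).map (fun k => k - acc))
        = (k :: ks).map (fun x => x - (acc + t)) := by
      simp only [List.map_cons, pvInnerA, if_pos hlt, List.map_map]
      simp [Function.comp, sub_sub]
    rw [this, ih done (List.pairwise_cons.1 hcomps).2
      (fun y hy ct hct => hdone y hy ct (by simp [hct]))]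
    simp only [pvTwoPtr, if_neg (by omega : ¬ k - acc ≤ c)]

theorem pvInsertBy_pairwise {α : Type} (R : α → α → Prop) (bef : α → α → Bool)
    (htrans : ∀ a b c, R a b → R b c → R a c)
    (hyes : ∀ a b, bef a b = true → R a b) (hno : ∀ a b, bef a b = false → R b a)
    (x : α) (ys : List α) (h : ys.Pairwise R) :
    (PySem.List.insertBy bef x ys).Pairwise R := by
  induction ys with
  | nil => simp [PySem.List.insertBy]
  | cons y ys ih =>
    simp only [PySem.List.insertBy]
    rcases hb : bef x y with hf | ht
    · simp only [Bool.false_eq_true, if_false]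
      rw [List.pairwise_cons] at h ⊢
      refine ⟨?_, ih h.2⟩
      intro z hz
      rcases (PySem.List.mem_insertBy bef x z ys).1 hz with rfl | hz'
      · exact hno _ y hb
      · exact h.1 z hz'
    · simp only [if_true]
      rw [List.pairwise_cons] at h ⊢
      refine ⟨?_, List.pairwise_cons.2 h⟩
      intro z hz
      rcases List.mem_cons.1 hz with rfl | hz'
      · exact hyes x z hb
      · exact htrans _ _ _ (hyes x y hb) (h.1 z hz')

theorem pvFoldlInsertBy_pairwise {α : Type} (R : α → α → Prop) (bef : α → α → Bool)
    (htrans : ∀ a b c, R a b → R b c → R a c)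
    (hyes : ∀ a b, bef a b = true → R a b) (hno : ∀ a b, bef a b = false → R b a)
    (xs acc : List α) (h : acc.Pairwise R) :
    (xs.foldl (fun acc x => PySem.List.insertBy bef x acc) acc).Pairwise R := by
  induction xs generalizing acc with
  | nil => exact h
  | cons x xs ih =>
    exact ih _ (pvInsertBy_pairwise R bef htrans hyes hno x acc h)

theorem pvSorted2_pairwise (xs : List (Int × Int)) :
    (PySem.List.sorted2 xs Prod.fst Prod.snd false).Pairwise (fun a b => a.1 ≤ b.1) := by
  have h := pvFoldlInsertBy_pairwise (fun (a b : Int × Int) => a.1 ≤ b.1)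
      (fun a b => decide (a.1 < b.1) || (!decide (b.1 < a.1) && decide (a.2 < b.2)))
      (fun a b c (h1 : a.1 ≤ b.1) (h2 : b.1 ≤ c.1) => le_trans h1 h2) ?_ ?_ xs [] (by simp)
  · simpa [PySem.List.sorted2] using h
  · intro a b hb
    simp only [Bool.or_eq_true, Bool.and_eq_true, Bool.not_eq_eq_eq_not, Bool.not_true,
      decide_eq_true_eq, decide_eq_false_iff_not] at hb
    rcases hb with h | ⟨h, _⟩ <;> omega
  · intro a b hb
    simp only [Bool.or_eq_false_iff, Bool.and_eq_false_iff, Bool.not_eq_eq_eq_not, Bool.not_false,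
      decide_eq_false_iff_not, decide_eq_true_eq] at hb
    have := hb.1
    omega

theorem finalphase (items : List (Int × Int)) (j : Nat) (d0 : PySem.Dict Int Int)
    (outIdx : List Int) (h : j + items.length ≤ outIdx.length) :
    (PySem.List.enumerate items (j : Int)).foldl
        (fun d p => d.insert (PySem.List.pyGetD outIdx p.1 0) p.2.2) d0
      = d0.update ((outIdx.drop j).zip (items.map Prod.snd)) := by
  induction items generalizing j d0 with
  | nil => simp [PySem.List.enumerate, PySem.Dict.update]
  | cons it its ih =>
    rw [PySem.List.enumerate_cons]
    simp only [List.foldl_cons]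
    have hj : j < outIdx.length := by simp at h; omega
    have hcast : (j : Int) + 1 = ((j + 1 : Nat) : Int) := by push_cast; ring
    rw [hcast, ih (j + 1) _ (by simp at h ⊢; omega)]
    have hget : PySem.List.pyGetD outIdx (j : Int) 0 = outIdx[j] := by
      rw [PySem.List.pyGetD_natCast]
      exact List.getD_eq_getElem _ _ hj
    have hdrop : outIdx.drop j = outIdx[j] :: outIdx.drop (j + 1) :=
      (List.getElem_cons_drop hj).symm
    rw [hdrop]
    simp only [PySem.Dict.update, hget, List.map_cons, List.zip_cons_cons, List.foldl_cons]

-- ===== VERDICT (by name: the statement is the Claim_ definition above) =====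
theorem updateExpandIndexes_py_spec : Claim_equal_updateExpandIndexes_py := by
  intro expand compress _
  unfold Spec_updateExpandIndexes_py updateExpandIndexes_py updateExpandIndexes_py_alt
  dsimp only
  have hcore : (PySem.List.sorted2 (PySem.Dict.ofList compress).items Prod.fst Prod.snd false).foldl
        (fun xs ct => pvInnerA ct.1 ct.2 xs)
        (PySem.List.sorted (PySem.Dict.ofList expand).keys (fun x => x) false)
      = pvTwoPtr (PySem.List.sorted (PySem.Dict.ofList expand).keys (fun x => x) false) 0
        (PySem.List.sorted2 (PySem.Dict.ofList compress).items Prod.fst Prod.snd false) := by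
    have h := core (PySem.List.sorted (PySem.Dict.ofList expand).keys (fun x => x) false) 0
      (PySem.List.sorted2 (PySem.Dict.ofList compress).items Prod.fst Prod.snd false) []
      (pvSorted2_pairwise _) (by simp)
    simpa using h
  rw [hcore]
  have hlen : (PySem.List.sorted2 (PySem.Dict.ofList expand).items Prod.fst Prod.snd false).length
      ≤ (pvTwoPtr (PySem.List.sorted (PySem.Dict.ofList expand).keys (fun x => x) false) 0
          (PySem.List.sorted2 (PySem.Dict.ofList compress).items Prod.fst Prod.snd false)).length := by
    rw [← hcore, foldl_pvInnerA_length]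
    have h1 := (PySem.List.sorted2_perm (PySem.Dict.ofList expand).items Prod.fst Prod.snd false).length_eq
    have h2 := (PySem.List.sorted_perm (PySem.Dict.ofList expand).keys (fun x => x) false).length_eq
    have h3 : (PySem.Dict.ofList expand).keys.length = (PySem.Dict.ofList expand).items.length := by
      simp [PySem.Dict.keys]
    omega
  have h := finalphase (PySem.List.sorted2 (PySem.Dict.ofList expand).items Prod.fst Prod.snd false) 0
    PySem.Dict.empty
    (pvTwoPtr (PySem.List.sorted (PySem.Dict.ofList expand).keys (fun x => x) false) 0
      (PySem.List.sorted2 (PySem.Dict.ofList compress).items Prod.fst Prod.snd false))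
    (by simpa using hlen)
  simp only [Nat.cast_zero, List.drop_zero] at h
  rw [h]
  rfl
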